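-- pv_equiv track=rewrite | github.com/karanS08/turtlebot_LLM_control | turtlebot_llm_control/speech_parser.py | extract_bin_label
-- ===== SOURCE A (Python) =====
-- COLOR_NAMES = ("red", "green", "blue", "yellow")
--
-- def extract_bin_label(text: str) -> tuple[str, str]:
--     color = extract_color(text)
--     if "bin" not in text:
--         return "", color
--
--     digits = ""
--     start_collecting = False
--     for char in text:
--         if char.isdigit():
--             digits += char
--             start_collecting = True
--         elif start_collecting:
--             break
--
--     if color and digits:
--         return "{}_bin_{:02d}".format(color, int(digits)), color
--     if digits:
--         return "bin_{:02d}".format(int(digits)), color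
--     if color:
--         return "", color
--     return "", ""
--
-- def extract_color(text: str) -> str:
--     for color in COLOR_NAMES:
--         if color in text:
--             return color
--     return ""
-- ===== SOURCE B (Python) =====
-- COLOR_NAMES = ("red", "green", "blue", "yellow")
--
-- def extract_color(text: str) -> str:
--     return next((c for c in COLOR_NAMES if c in text), "")
--
-- def extract_bin_label(text: str) -> tuple[str, str]:
--     color = extract_color(text)
--     if "bin" not in text:
--         return "", color
--     # two-pointer scan: i = start of the first digit run, j = its end
--     i, n = 0, len(text)
--     while i < n and not text[i].isdigit():
--         i += 1
--     j = i
--     while j < n and text[j].isdigit():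
--         j += 1
--     if i == j:
--         return "", color
--     label = "bin_{:02d}".format(int(text[i:j]))
--     if color:
--         label = color + "_" + label
--     return label, color
-- ===== Notes on version B (the rewrite author's own statement) =====
-- stated objective: idiomatic
-- what changed: extract_color becomes a next(generator) one-liner, the flag-driven digit-collecting loop is replaced by a two-pointer index scan that slices text[i:j], and the four-branch return is collapsed to building one label and prefixing the color when present.
import Mathlib
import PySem

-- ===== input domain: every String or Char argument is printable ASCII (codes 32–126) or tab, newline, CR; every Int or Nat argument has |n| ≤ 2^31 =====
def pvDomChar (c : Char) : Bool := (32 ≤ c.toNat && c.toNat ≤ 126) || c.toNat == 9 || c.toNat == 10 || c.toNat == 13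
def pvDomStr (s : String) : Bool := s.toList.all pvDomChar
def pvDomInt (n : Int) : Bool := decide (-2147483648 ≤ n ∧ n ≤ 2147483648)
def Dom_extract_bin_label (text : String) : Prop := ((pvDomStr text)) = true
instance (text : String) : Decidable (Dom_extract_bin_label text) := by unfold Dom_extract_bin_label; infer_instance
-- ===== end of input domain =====

-- B restructures A: extract_color via find-first over the tuple, the flag-driven digit
-- loop becomes a two-pointer index scan with a slice, and the four return branches
-- collapse to one label with an optional color prefix; objective: idiomatic.

-- ===== PORT A =====
-- extract_color: scan COLOR_NAMES in order, return the first that is a substring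
def eblColor (text : String) : String :=
  if PySem.Str.isIn "red" text then "red"
  else if PySem.Str.isIn "green" text then "green"
  else if PySem.Str.isIn "blue" text then "blue"
  else if PySem.Str.isIn "yellow" text then "yellow"
  else ""

-- "{:02d}".format(n) for the nonnegative n produced here = str(n).zfill(2)
def eblFmt2 (n : Int) : String := PySem.Str.zfill (PySem.Int.toStr n) 2

-- A's for-loop with the start_collecting flag and the break
def eblLoopA : List Char → List Char → Bool → List Char
  | [], digits, _ => digits
  | c :: cs, digits, started =>
    if PySem.Chars.isdigit c then eblLoopA cs (digits ++ [c]) true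
    else if started then digits
    else eblLoopA cs digits started

def extract_bin_label (text : String) : String × String :=
  let color := eblColor text
  if !(PySem.Str.isIn "bin" text) then ("", color)
  else
    let digits := eblLoopA text.toList [] false
    -- int(digits): digits is a nonempty run of '0'-'9' whenever it is read, so ofChars? is some; exact on Dom
    if color ≠ "" ∧ digits ≠ [] then (color ++ "_bin_" ++ eblFmt2 ((PySem.Int.ofChars? digits).getD 0), color)
    else if digits ≠ [] then ("bin_" ++ eblFmt2 ((PySem.Int.ofChars? digits).getD 0), color)
    else if color ≠ "" then ("", color)
    else ("", "")

-- ===== PORT B =====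
-- next((c for c in COLOR_NAMES if c in text), "")
def eblColorB (text : String) : String :=
  ((["red", "green", "blue", "yellow"].find? (fun c => PySem.Str.isIn c text)).getD "")

-- while i < n and not text[i].isdigit(): i += 1  (recursion over the unscanned suffix, carrying i)
def eblFindStart : List Char → Nat → Nat
  | [], i => i
  | c :: cs, i => if PySem.Chars.isdigit c then i else eblFindStart cs (i + 1)

-- while j < n and text[j].isdigit(): j += 1
def eblFindEnd : List Char → Nat → Nat
  | [], j => j
  | c :: cs, j => if PySem.Chars.isdigit c then eblFindEnd cs (j + 1) else j

def extract_bin_label_alt (text : String) : String × String :=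
  let color := eblColorB text
  if !(PySem.Str.isIn "bin" text) then ("", color)
  else
    let cs := text.toList
    let i := eblFindStart cs 0
    let j := eblFindEnd (cs.drop i) i
    if i = j then ("", color)
    else
      -- text[i:j] with 0 ≤ i ≤ j ≤ len: exactly drop i, take (j - i)
      let label := "bin_" ++ eblFmt2 ((PySem.Int.ofChars? ((cs.drop i).take (j - i))).getD 0)
      if color ≠ "" then (color ++ "_" ++ label, color) else (label, color)

-- ===== PRECONDITION & SPEC =====
def Spec_extract_bin_label (text : String) (out : String × String) : Prop := out = extract_bin_label_alt text
instance (text : String) (out : String × String) : Decidable (Spec_extract_bin_label text out) := by unfold Spec_extract_bin_label; infer_instance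

-- ===== CLAIM =====
def Claim_equal_extract_bin_label : Prop := ∀ (text : String), Dom_extract_bin_label text → Spec_extract_bin_label text (extract_bin_label text)

-- ===== LEMMAS AND PROOFS =====
theorem eblColorB_eq (text : String) : eblColorB text = eblColor text := by
  unfold eblColorB eblColor
  simp only [List.find?]
  split_ifs <;> simp_all

theorem eblLoopA_true (cs : List Char) (d : List Char) :
    eblLoopA cs d true = d ++ cs.takeWhile PySem.Chars.isdigit := by
  induction cs generalizing d with
  | nil => simp [eblLoopA]
  | cons c cs ih =>
    by_cases h : PySem.Chars.isdigit c
    · simp [eblLoopA, h, List.takeWhile, ih]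
    · simp [eblLoopA, h, List.takeWhile]

theorem eblLoopA_false (cs : List Char) :
    eblLoopA cs [] false
      = (cs.dropWhile (fun c => !PySem.Chars.isdigit c)).takeWhile PySem.Chars.isdigit := by
  induction cs with
  | nil => simp [eblLoopA]
  | cons c cs ih =>
    by_cases h : PySem.Chars.isdigit c
    · simp [eblLoopA, h, List.dropWhile, eblLoopA_true]
    · simp [eblLoopA, h, List.dropWhile, ih]

theorem eblFindStart_spec (cs : List Char) (k : Nat) :
    eblFindStart cs k = k + (cs.takeWhile (fun c => !PySem.Chars.isdigit c)).length := by
  induction cs generalizing k with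
  | nil => simp [eblFindStart]
  | cons c cs ih =>
    by_cases h : PySem.Chars.isdigit c
    · simp [eblFindStart, h, List.takeWhile]
    · simp [eblFindStart, h, List.takeWhile, ih]; omega

theorem eblFindEnd_spec (cs : List Char) (k : Nat) :
    eblFindEnd cs k = k + (cs.takeWhile PySem.Chars.isdigit).length := by
  induction cs generalizing k with
  | nil => simp [eblFindEnd]
  | cons c cs ih =>
    by_cases h : PySem.Chars.isdigit c
    · simp [eblFindEnd, h, List.takeWhile, ih]; omega
    · simp [eblFindEnd, h, List.takeWhile]

theorem drop_tw (cs : List Char) :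
    cs.drop (cs.takeWhile (fun c => !PySem.Chars.isdigit c)).length
      = cs.dropWhile (fun c => !PySem.Chars.isdigit c) := by
  induction cs with
  | nil => rfl
  | cons c cs ih =>
    by_cases h : PySem.Chars.isdigit c <;> simp [List.takeWhile, List.dropWhile, h, ih]

theorem take_tw (cs : List Char) :
    cs.take (cs.takeWhile PySem.Chars.isdigit).length = cs.takeWhile PySem.Chars.isdigit := by
  induction cs with
  | nil => rfl
  | cons c cs ih =>
    by_cases h : PySem.Chars.isdigit c <;> simp [List.takeWhile, h, ih]

theorem str_underscore_assoc (c x : String) :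
    c ++ "_bin_" ++ x = c ++ "_" ++ ("bin_" ++ x) := by
  have h : ("_" : String) ++ "bin_" = "_bin_" := rfl
  rw [String.append_assoc, String.append_assoc, ← h, String.append_assoc]

-- ===== VERDICT =====
theorem extract_bin_label_spec : Claim_equal_extract_bin_label := by
  intro text _
  unfold Spec_extract_bin_label extract_bin_label extract_bin_label_alt
  rw [eblColorB_eq]
  by_cases hb : PySem.Str.isIn "bin" text
  case neg =>
    have hb' : PySem.Chars.isIn ['b', 'i', 'n'] text.toList = false := by
      simp only [PySem.Str.isIn, Bool.not_eq_true] at hb; exact hb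
    simp [hb']
  simp only [hb, Bool.not_true, Bool.false_eq_true, if_false]
  rw [eblLoopA_false, eblFindStart_spec, eblFindEnd_spec, Nat.zero_add, drop_tw,
      Nat.add_sub_cancel_left, take_tw]
  by_cases hd :
      (List.takeWhile PySem.Chars.isdigit
        (List.dropWhile (fun c => !PySem.Chars.isdigit c) text.toList)) = []
  · rw [hd]
    simp only [List.length_nil, Nat.add_zero, ne_eq, not_true_eq_false,
      and_false, if_false]
    by_cases hcol : eblColor text = "" <;> simp [hcol]
  · have hl : (List.takeWhile PySem.Chars.isdigit
        (List.dropWhile (fun c => !PySem.Chars.isdigit c) text.toList)).length ≠ 0 := by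
      simpa [List.length_eq_zero_iff] using hd
    have hne : ¬ ((List.takeWhile (fun c => !PySem.Chars.isdigit c) text.toList).length
        = (List.takeWhile (fun c => !PySem.Chars.isdigit c) text.toList).length
          + (List.takeWhile PySem.Chars.isdigit
              (List.dropWhile (fun c => !PySem.Chars.isdigit c) text.toList)).length) := by
      omega
    rw [if_neg hne]
    by_cases hcol : eblColor text = ""
    · simp [hcol, hd]
    · simp only [ne_eq, hcol, not_false_eq_true, hd, and_self, if_true]
      exact congrArg (fun s => (s, eblColor text)) (str_underscore_assoc _ _)
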